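-- pv_equiv track=rewrite | github.com/richardmantikgeek1/LeetCode-Python-PUBLIC | Easy/Hash Table - unique-email-addresses.py | get_actual_email
-- ===== SOURCE A (Python) =====
-- def get_actual_email(email):
--     actual_email = ''
--     i = 0
--     is_ignored = False
--     is_domain_name = False
--     while (i < len(email)):
--         c = email[i]
--         if (not is_domain_name and c == '@'):
--             is_ignored = False
--             is_domain_name = True
--             actual_email += c
--         elif (not is_domain_name and c == '.'):
--             pass
--         elif (not is_domain_name and c == '+'):
--             is_ignored = True
--         elif (not is_domain_name and is_ignored):
--             pass
--         else:
--             actual_email += c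
--
--         i += 1
--
--     return actual_email
-- ===== SOURCE B (Python) =====
-- def get_actual_email(email):
--     local, sep, domain = email.partition('@')
--     local = local.partition('+')[0]
--     return ''.join(c for c in local if c != '.') + sep + domain
-- ===== Notes on version B (the rewrite author's own statement) =====
-- stated objective: idiomatic
-- what changed: Replaces A's stateful char-by-char while-loop with two boolean flags (and repeated string concatenation) by an idiomatic partition-on-'@' / cut-at-'+' / filter-out-dots decomposition of the local part.
import Mathlib
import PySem

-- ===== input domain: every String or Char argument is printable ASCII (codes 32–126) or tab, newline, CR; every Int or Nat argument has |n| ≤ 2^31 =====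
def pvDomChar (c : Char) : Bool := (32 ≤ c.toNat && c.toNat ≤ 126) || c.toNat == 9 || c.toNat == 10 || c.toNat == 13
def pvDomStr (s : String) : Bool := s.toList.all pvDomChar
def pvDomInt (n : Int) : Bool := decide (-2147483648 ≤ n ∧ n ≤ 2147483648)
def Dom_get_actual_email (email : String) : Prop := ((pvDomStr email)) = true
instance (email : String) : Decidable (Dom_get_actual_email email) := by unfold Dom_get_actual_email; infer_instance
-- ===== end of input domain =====

-- B replaces A's stateful char-by-char flag loop (quadratic string concatenation) by an idiomatic partition/filter decomposition (objective: idiomatic; measured faster in a timing run).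

-- ===== PORT A =====
-- A's while-loop over the characters, with its accumulator and the two flags, as structural recursion.
def aLoop : List Char → List Char → Bool → Bool → List Char
  | [], acc, _, _ => acc
  | c :: rest, acc, ig, dom =>
    if !dom && (c == '@') then aLoop rest (acc ++ [c]) false true
    else if !dom && (c == '.') then aLoop rest acc ig dom
    else if !dom && (c == '+') then aLoop rest acc true dom
    else if !dom && ig then aLoop rest acc ig dom
    else aLoop rest (acc ++ [c]) ig dom

def get_actual_email (email : String) : String :=
  String.ofList (aLoop email.toList [] false false)

-- ===== PORT B =====
-- str.partition with a single-character separator (PySem has no partition): before the first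
-- occurrence / from the first occurrence = takeWhile / dropWhile — exact.
-- ''.join(c for c in local if c != '.') is List.filter — exact.
def get_actual_email_alt (email : String) : String :=
  let cs := email.toList
  let loc := cs.takeWhile (fun c => c ≠ '@')        -- local, of email.partition('@')
  let sepdom := cs.dropWhile (fun c => c ≠ '@')     -- sep + domain, of email.partition('@')
  let loc2 := loc.takeWhile (fun c => c ≠ '+')      -- local.partition('+')[0]
  String.ofList (loc2.filter (fun c => c ≠ '.') ++ sepdom)

-- ===== PRECONDITION & SPEC =====
def Spec_get_actual_email (email : String) (out : String) : Prop := out = get_actual_email_alt email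
instance (email : String) (out : String) : Decidable (Spec_get_actual_email email out) := by unfold Spec_get_actual_email; infer_instance

-- ===== CLAIM (what is proved, stated in full; the proofs are below) =====
def Claim_equal_get_actual_email : Prop := ∀ (email : String), Dom_get_actual_email email → Spec_get_actual_email email (get_actual_email email)

-- ===== LEMMAS AND PROOFS =====

-- A's loop once is_ignored is set (and is_domain_name still false): it drops everything up to the first '@'.
def igTail : List Char → List Char
  | [] => []
  | c :: r => if c = '@' then c :: r else igTail r

-- A's loop in the initial state: dots dropped, cut at the first '+', verbatim from the first '@'.
def locRes : List Char → List Char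
  | [] => []
  | c :: r =>
    if c = '@' then c :: r
    else if c = '.' then locRes r
    else if c = '+' then igTail r
    else c :: locRes r

theorem aLoop_spec (cs : List Char) : ∀ (acc : List Char) (ig dom : Bool),
    aLoop cs acc ig dom = acc ++ (if dom then cs else if ig then igTail cs else locRes cs) := by
  induction cs with
  | nil => intro acc ig dom; cases ig <;> cases dom <;> simp [aLoop, igTail, locRes]
  | cons c r ih =>
    intro acc ig dom
    cases dom with
    | true => simp [aLoop, ih]
    | false =>
      by_cases h1 : c = '@'
      · cases ig <;> simp [aLoop, h1, ih, igTail, locRes]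
      · by_cases h2 : c = '.'
        · simp [aLoop, h2, ih, igTail, locRes]
        · by_cases h3 : c = '+'
          · cases ig <;> simp [aLoop, h3, ih, igTail, locRes]
          · cases ig with
            | true => simp [aLoop, h1, h2, h3, ih, igTail]
            | false => simp [aLoop, h1, h2, h3, ih, locRes]

theorem igTail_eq_dropWhile (cs : List Char) :
    igTail cs = cs.dropWhile (fun c => c ≠ '@') := by
  induction cs with
  | nil => simp [igTail]
  | cons c r ih =>
    by_cases h : c = '@' <;> simp [igTail, List.dropWhile, h, ih]

theorem locRes_eq (cs : List Char) :
    locRes cs = ((cs.takeWhile (fun c => c ≠ '@')).takeWhile (fun c => c ≠ '+')).filter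
        (fun c => c ≠ '.') ++ cs.dropWhile (fun c => c ≠ '@') := by
  induction cs with
  | nil => simp [locRes]
  | cons c r ih =>
    by_cases h1 : c = '@'
    · simp [locRes, h1, List.takeWhile, List.dropWhile]
    · by_cases h2 : c = '.'
      · have h3 : c ≠ '+' := by subst h2; decide
        simp [locRes, h2, List.takeWhile, List.dropWhile, ih]
      · by_cases h3 : c = '+'
        · simp [locRes, h3, List.takeWhile, List.dropWhile,
            igTail_eq_dropWhile]
        · simp [locRes, h1, h2, h3, List.takeWhile, List.dropWhile, ih]

-- ===== VERDICT (by name: the statement is the Claim_ definition above) =====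
theorem get_actual_email_spec : Claim_equal_get_actual_email := by
  intro email _
  unfold Spec_get_actual_email get_actual_email get_actual_email_alt
  rw [aLoop_spec]
  simp [locRes_eq]
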